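-- pv_equiv track=rewrite | github.com/nossbigg/charities-gov-sg-scraper | effective-altruism/extractor/globalgiving_extractor.py | merge_programs_from_common_charities
-- ===== SOURCE A (Python) =====
-- def merge_programs_from_common_charities(charities_column_names_standardized):
--     charities_merged = {}
--
--     for charity in charities_column_names_standardized:
--         charity_name = charity['name']
--
--         if charity_name not in charities_merged:
--             charities_merged[charity_name] = charity
--             continue
--
--         existing_charity = charities_merged[charity_name]
--
--         merged_charity = {
--             'name': existing_charity['name'],
--             'country': existing_charity['country'] + ", " + charity['country'],
--             'description': existing_charity['description'] + ", " + charity['description'],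
--             'cause_area': existing_charity['cause_area'] + ", " + charity['cause_area'],
--         }
--
--         charities_merged[charity_name] = merged_charity
--
--     return list(charities_merged.values())
-- ===== SOURCE B (Python) =====
-- def merge_programs_from_common_charities(charities_column_names_standardized):
--     # Group charities by name (first-appearance order), then reduce each group.
--     groups = {}
--     for charity in charities_column_names_standardized:
--         groups.setdefault(charity['name'], []).append(charity)
--
--     merged = []
--     for group in groups.values():
--         if len(group) == 1:
--             merged.append(group[0])
--         else:
--             merged.append({
--                 'name': group[0]['name'],
--                 'country': ", ".join(c['country'] for c in group),
--                 'description': ", ".join(c['description'] for c in group),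
--                 'cause_area': ", ".join(c['cause_area'] for c in group),
--             })
--     return merged
-- ===== Notes on version B (the rewrite author's own statement) =====
-- stated objective: alternative
-- what changed: Replaces A's incremental in-loop pairwise merging of a running dict with a two-pass index-then-reduce decomposition: first group charities by name into lists, then emit each singleton group unchanged and collapse each larger group with one ', '.join per field.
import Mathlib
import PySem

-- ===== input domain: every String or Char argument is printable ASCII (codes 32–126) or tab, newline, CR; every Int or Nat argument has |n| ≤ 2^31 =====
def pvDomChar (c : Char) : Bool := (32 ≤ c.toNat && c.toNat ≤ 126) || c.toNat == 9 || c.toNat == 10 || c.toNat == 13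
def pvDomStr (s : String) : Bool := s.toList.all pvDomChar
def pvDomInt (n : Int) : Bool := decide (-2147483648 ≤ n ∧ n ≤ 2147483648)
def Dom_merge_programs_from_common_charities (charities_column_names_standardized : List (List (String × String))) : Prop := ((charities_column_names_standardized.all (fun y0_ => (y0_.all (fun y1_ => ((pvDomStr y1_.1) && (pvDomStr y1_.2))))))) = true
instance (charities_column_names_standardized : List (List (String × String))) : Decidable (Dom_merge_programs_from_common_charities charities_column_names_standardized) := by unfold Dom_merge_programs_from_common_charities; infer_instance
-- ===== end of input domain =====

-- B replaces A's incremental in-loop merging with a group-by-name pass followed by a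
-- reduce pass (singleton groups emitted unchanged, larger groups joined per field);
-- same asymptotic cost, different decomposition.

-- Shared inner-dict primitive: charity['k'] on a dict given as an association list
-- (first match; exact vs Python under Pre_'s no-duplicate-keys condition).
def pvGet (c : List (String × String)) (k : String) : Option String :=
  (PySem.Dict.mk c).get? k

-- ===== PORT A =====
-- one iteration of A's loop; `none` = the KeyError Python would raise
def pvStepA (d : PySem.Dict String (List (String × String))) (charity : List (String × String)) :
    Option (PySem.Dict String (List (String × String))) :=
  match pvGet charity "name" with
  | none => none
  | some charity_name =>
    if d.contains charity_name then
      let existing := d.getD charity_name []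
      match pvGet existing "name", pvGet existing "country", pvGet charity "country",
            pvGet existing "description", pvGet charity "description",
            pvGet existing "cause_area", pvGet charity "cause_area" with
      | some n, some ec, some cc, some ed, some cd, some ea, some ca =>
          some (d.insert charity_name
            [("name", n), ("country", ec ++ ", " ++ cc),
             ("description", ed ++ ", " ++ cd), ("cause_area", ea ++ ", " ++ ca)])
      | _, _, _, _, _, _, _ => none
    else
      some (d.insert charity_name charity)

def merge_programs_from_common_charities (charities_column_names_standardized : List (List (String × String))) : List (List (String × String)) :=
  match charities_column_names_standardized.foldl
      (fun acc charity => acc.bind (fun d => pvStepA d charity))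
      (some PySem.Dict.empty) with
  | some charities_merged => charities_merged.values
  | none => []   -- unreachable under Pre_ (Python raises KeyError)

-- ===== PORT B =====
-- first pass: groups.setdefault(charity['name'], []).append(charity)
def pvGroups (xs : List (List (String × String))) :
    Option (PySem.Dict String (List (List (String × String)))) :=
  xs.foldl
    (fun acc charity => acc.bind (fun d =>
      (pvGet charity "name").map (fun n => d.modify n [] (· ++ [charity]))))
    (some PySem.Dict.empty)

-- ", ".join(c[k] for c in group); `none` = KeyError
def pvJoinField (g : List (List (String × String))) (k : String) : Option String :=
  (g.mapM (fun c => pvGet c k)).map (fun vs => PySem.Str.join ", " vs)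

-- body of B's second loop, for one group
def pvEmit (g : List (List (String × String))) : Option (List (String × String)) :=
  if g.length == 1 then some (PySem.List.pyGetD g 0 [])
  else
    match pvGet (PySem.List.pyGetD g 0 []) "name",
          pvJoinField g "country", pvJoinField g "description", pvJoinField g "cause_area" with
    | some n, some co, some de, some ca =>
        some [("name", n), ("country", co), ("description", de), ("cause_area", ca)]
    | _, _, _, _ => none

def merge_programs_from_common_charities_alt (charities_column_names_standardized : List (List (String × String))) : List (List (String × String)) :=
  match pvGroups charities_column_names_standardized with
  | none => []
  | some groups =>
    match groups.values.mapM pvEmit with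
    | some merged => merged
    | none => []

-- ===== PRECONDITION & SPEC =====
-- Pre_ excludes (a) inner association lists with duplicate keys, where a Python dict collapses
-- the duplicates so the association list does not denote the dict A actually receives, and
-- (b) the inputs on which Python A raises KeyError: a charity without a 'name' key, or a
-- charity sharing its name with another but lacking 'country'/'description'/'cause_area'.
def Pre_merge_programs_from_common_charities (charities_column_names_standardized : List (List (String × String))) : Prop :=
  ∀ c ∈ charities_column_names_standardized,
    (c.map Prod.fst).Nodup ∧ (pvGet c "name").isSome ∧
    (2 ≤ charities_column_names_standardized.countP (fun c' => pvGet c' "name" == pvGet c "name") →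
      (pvGet c "country").isSome ∧ (pvGet c "description").isSome ∧ (pvGet c "cause_area").isSome)
instance (charities_column_names_standardized : List (List (String × String))) : Decidable (Pre_merge_programs_from_common_charities charities_column_names_standardized) := by unfold Pre_merge_programs_from_common_charities; infer_instance

def pvWitness_merge_programs_from_common_charities : (List (List (String × String))) :=
  [[("name", "a"), ("country", "X"), ("description", "d1"), ("cause_area", "h")],
   [("name", "b"), ("extra", "kept")],
   [("name", "a"), ("country", "Y"), ("description", "d2"), ("cause_area", "h")]]

def Spec_merge_programs_from_common_charities (charities_column_names_standardized : List (List (String × String))) (out : List (List (String × String))) : Prop := out = merge_programs_from_common_charities_alt charities_column_names_standardized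
instance (charities_column_names_standardized : List (List (String × String))) (out : List (List (String × String))) : Decidable (Spec_merge_programs_from_common_charities charities_column_names_standardized out) := by unfold Spec_merge_programs_from_common_charities; infer_instance

-- ===== CLAIM (what is proved, stated in full; the proofs are below) =====
def Claim_equal_merge_programs_from_common_charities : Prop := ∀ (charities_column_names_standardized : List (List (String × String))), Dom_merge_programs_from_common_charities charities_column_names_standardized → Pre_merge_programs_from_common_charities charities_column_names_standardized → Spec_merge_programs_from_common_charities charities_column_names_standardized (merge_programs_from_common_charities charities_column_names_standardized)

-- ===== LEMMAS AND PROOFS =====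

-- the value A's dict holds for a name whose group (in order of appearance) is g
def pvNm (g : List (List (String × String))) : String := (pvGet (g.headD []) "name").getD ""
def pvCat (g : List (List (String × String))) (k : String) : String :=
  PySem.Str.join ", " (g.map (fun c => (pvGet c k).getD ""))
def pvReduce (g : List (List (String × String))) : List (String × String) :=
  if g.length = 1 then g.headD []
  else [("name", pvNm g), ("country", pvCat g "country"),
        ("description", pvCat g "description"), ("cause_area", pvCat g "cause_area")]

-- invariant tying A's running dict to B's grouping dict after processing `pre`
def pvInv (pre : List (List (String × String)))
    (dA : PySem.Dict String (List (String × String)))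
    (dB : PySem.Dict String (List (List (String × String)))) : Prop :=
  dA.keys = dB.keys ∧ dB.keys.Nodup ∧
  (∀ n, dB.getD n [] = pre.filter (fun c => pvGet c "name" == some n)) ∧
  (∀ n, dB.contains n = pre.any (fun c => pvGet c "name" == some n)) ∧
  (∀ n, dB.contains n = true → dA.getD n [] = pvReduce (dB.getD n []))

theorem mapM_eq_some_map {α β : Type} (f : α → Option β) (h : α → β) :
    ∀ l : List α, (∀ x ∈ l, f x = some (h x)) → l.mapM f = some (l.map h) := by
  intro l hl
  induction l with
  | nil => rfl
  | cons a t ih =>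
    have ha := hl a (by simp)
    have ht := ih (fun x hx => hl x (by simp [hx]))
    simp [List.mapM_cons, ha, ht]

theorem chars_join_append_singleton (s x : List Char) : ∀ (l : List (List Char)), l ≠ [] →
    PySem.Chars.join s (l ++ [x]) = PySem.Chars.join s l ++ s ++ x := by
  intro l
  induction l with
  | nil => intro h; simp at h
  | cons a t ih =>
    intro _
    cases t with
    | nil => simp [PySem.Chars.join_cons_cons, PySem.Chars.join_singleton]
    | cons b t' =>
      have := ih (by simp)
      simp only [List.cons_append, PySem.Chars.join_cons_cons] at *
      simp [this]

theorem join_append_singleton (s x : String) (l : List String) (hl : l ≠ []) :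
    PySem.Str.join s (l ++ [x]) = PySem.Str.join s l ++ s ++ x := by
  apply String.toList_inj.mp
  simp only [PySem.Str.toList_join, String.toList_append, List.map_append, List.map_cons,
    List.map_nil]
  exact chars_join_append_singleton s.toList x.toList (l.map String.toList) (by simpa using hl)

-- pvCat over a one-element group is that element's field
theorem pvCat_singleton (c : List (String × String)) (k v : String)
    (h : pvGet c k = some v) : pvCat [c] k = v := by
  unfold pvCat
  simp only [List.map_cons, List.map_nil, h, Option.getD_some]
  apply String.toList_inj.mp
  simp [PySem.Str.toList_join, PySem.Chars.join_singleton]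

theorem pvCat_append_singleton (g : List (List (String × String)))
    (c : List (String × String)) (k v : String) (hg : g ≠ []) (h : pvGet c k = some v) :
    pvCat (g ++ [c]) k = pvCat g k ++ ", " ++ v := by
  unfold pvCat
  rw [List.map_append]
  simp only [List.map_cons, List.map_nil, h, Option.getD_some]
  exact join_append_singleton _ _ _ (by simpa using hg)

theorem pvNm_eq (g : List (List (String × String))) (n : String) (hg : g ≠ [])
    (hmem : ∀ c0 ∈ g, pvGet c0 "name" = some n) : pvNm g = n := by
  cases g with
  | nil => exact absurd rfl hg
  | cons c0 t => simp [pvNm, hmem c0 (by simp)]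

-- lookups on a reduced group value
theorem pvReduce_get_name (g : List (List (String × String))) (n : String) (hg : g ≠ [])
    (hmem : ∀ c0 ∈ g, pvGet c0 "name" = some n) :
    pvGet (pvReduce g) "name" = some n := by
  match g with
  | [] => exact absurd rfl hg
  | [c0] => simpa [pvReduce] using hmem c0 (by simp)
  | c0 :: c1 :: t =>
    rw [pvReduce, if_neg (by simp)]
    rw [pvNm_eq _ n hg hmem]
    simp [pvGet, PySem.Dict.get?_mk_cons]

theorem pvReduce_get_country (g : List (List (String × String))) (hg : g ≠ [])
    (hs : ∀ c0 ∈ g, (pvGet c0 "country").isSome) :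
    pvGet (pvReduce g) "country" = some (pvCat g "country") := by
  match g with
  | [] => exact absurd rfl hg
  | [c0] =>
    obtain ⟨v, hv⟩ := Option.isSome_iff_exists.mp (hs c0 (by simp))
    rw [pvReduce, if_pos (by simp)]
    simp [pvCat_singleton c0 _ v hv, hv]
  | c0 :: c1 :: t =>
    rw [pvReduce, if_neg (by simp)]
    simp [pvGet, PySem.Dict.get?_mk_cons]

theorem pvReduce_get_description (g : List (List (String × String))) (hg : g ≠ [])
    (hs : ∀ c0 ∈ g, (pvGet c0 "description").isSome) :
    pvGet (pvReduce g) "description" = some (pvCat g "description") := by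
  match g with
  | [] => exact absurd rfl hg
  | [c0] =>
    obtain ⟨v, hv⟩ := Option.isSome_iff_exists.mp (hs c0 (by simp))
    rw [pvReduce, if_pos (by simp)]
    simp [pvCat_singleton c0 _ v hv, hv]
  | c0 :: c1 :: t =>
    rw [pvReduce, if_neg (by simp)]
    simp [pvGet, PySem.Dict.get?_mk_cons]

theorem pvReduce_get_cause (g : List (List (String × String))) (hg : g ≠ [])
    (hs : ∀ c0 ∈ g, (pvGet c0 "cause_area").isSome) :
    pvGet (pvReduce g) "cause_area" = some (pvCat g "cause_area") := by
  match g with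
  | [] => exact absurd rfl hg
  | [c0] =>
    obtain ⟨v, hv⟩ := Option.isSome_iff_exists.mp (hs c0 (by simp))
    rw [pvReduce, if_pos (by simp)]
    simp [pvCat_singleton c0 _ v hv, hv]
  | c0 :: c1 :: t =>
    rw [pvReduce, if_neg (by simp)]
    simp [pvGet, PySem.Dict.get?_mk_cons]

-- main simultaneous induction: running both folds over the remaining suffix keeps pvInv
theorem pvMain (xs : List (List (String × String)))
    (hPre : Pre_merge_programs_from_common_charities xs) :
    ∀ (ys pre : List (List (String × String)))
      (dA : PySem.Dict String (List (String × String)))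
      (dB : PySem.Dict String (List (List (String × String)))),
      xs = pre ++ ys → pvInv pre dA dB →
      ∃ dA' dB',
        ys.foldl (fun acc charity => acc.bind (fun d => pvStepA d charity)) (some dA) = some dA' ∧
        ys.foldl (fun acc charity => acc.bind (fun d =>
            (pvGet charity "name").map (fun n => d.modify n [] (· ++ [charity])))) (some dB) = some dB' ∧
        pvInv xs dA' dB' := by
  intro ys
  induction ys with
  | nil =>
    intro pre dA dB hxs hInv
    refine ⟨dA, dB, rfl, rfl, ?_⟩
    have : pre = xs := by simpa using hxs.symm
    exact this ▸ hInv
  | cons c ys ih =>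
    intro pre dA dB hxs hInv
    obtain ⟨hk, hnd, hfil, hcon, hred⟩ := hInv
    have hc : c ∈ xs := by rw [hxs]; simp
    obtain ⟨hnodc, hnsome, hfields⟩ := hPre c hc
    obtain ⟨n, hn⟩ := Option.isSome_iff_exists.mp hnsome
    have hxs' : xs = (pre ++ [c]) ++ ys := by simpa using hxs
    have hcAB : dA.contains n = dB.contains n := by
      rw [PySem.Dict.contains_eq_decide_mem_keys, PySem.Dict.contains_eq_decide_mem_keys, hk]
    cases hb : dB.contains n with
    | false =>
      -- new name: A inserts the charity itself, B starts a fresh one-element group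
      have hbA : dA.contains n = false := by rw [hcAB, hb]
      have hnotmem : n ∉ dB.keys := fun hmem => by
        rw [← PySem.Dict.contains_iff_mem_keys] at hmem; rw [hb] at hmem; cases hmem
      have hgD : dB.getD n [] = [] := PySem.Dict.getD_of_not_contains _ _ hb
      have hstepA : pvStepA dA c = some (dA.insert n c) := by
        unfold pvStepA
        rw [hn]
        simp [hbA]
      have hpreNone : ∀ c0 ∈ pre, ¬((pvGet c0 "name" == some n) = true) := by
        have := hcon n
        rw [hb] at this
        exact fun c0 h0 => by
          have := List.any_eq_false.mp this.symm c0 h0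
          simp_all
      have hInv' : pvInv (pre ++ [c]) (dA.insert n c) (dB.modify n [] (· ++ [c])) := by
        have hkeysB : (dB.modify n [] (· ++ [c])).keys = dB.keys ++ [n] := by
          rw [PySem.Dict.keys_modify, PySem.Dict.keys_insert_of_not_contains _ _ hb]
        refine ⟨?_, ?_, ?_, ?_, ?_⟩
        · rw [PySem.Dict.keys_insert_of_not_contains _ _ hbA, hkeysB, hk]
        · rw [hkeysB]
          simp [List.nodup_append, hnd]
          exact fun a ha h => hnotmem (h ▸ ha)
        · intro n'
          rw [PySem.Dict.getD_modify]
          by_cases hnn : n' = n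
          · subst hnn
            rw [hgD, List.filter_append]
            have : pre.filter (fun c0 => pvGet c0 "name" == some n') = [] :=
              List.filter_eq_nil_iff.mpr hpreNone
            simp [this, hn]
          · rw [if_neg hnn, hfil n', List.filter_append]
            have : ((pvGet c "name" == some n') = false) := by
              rw [hn]; simp [Ne.symm hnn]
            simp [this]
        · intro n'
          rw [PySem.Dict.contains_modify, hcon n', List.any_append]
          by_cases hnn : n' = n
          · subst hnn; simp [hn]
          · have : ((pvGet c "name" == some n') = false) := by
              rw [hn]; simp [Ne.symm hnn]
            simp [this, hnn]
        · intro n' hc'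
          by_cases hnn : n' = n
          · subst hnn
            rw [PySem.Dict.getD_insert, if_pos rfl, PySem.Dict.getD_modify, if_pos rfl, hgD]
            simp [pvReduce]
          · rw [PySem.Dict.getD_insert, if_neg hnn, PySem.Dict.getD_modify, if_neg hnn]
            rw [PySem.Dict.contains_modify] at hc'
            have : dB.contains n' = true := by
              rcases Bool.or_eq_true_iff.mp hc' with h | h
              · exact absurd (by simpa using h) hnn
              · exact h
            exact hred n' this
      obtain ⟨dA', dB', hA, hB, hfin⟩ := ih (pre ++ [c]) (dA.insert n c) (dB.modify n [] (· ++ [c])) hxs' hInv'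
      refine ⟨dA', dB', ?_, ?_, hfin⟩
      · rw [List.foldl_cons]; simpa [hstepA] using hA
      · rw [List.foldl_cons]; simpa [hn] using hB
    | true =>
      -- existing name: A merges into the stored value, B appends to the group
      have hbA : dA.contains n = true := by rw [hcAB, hb]
      set g := dB.getD n [] with hgdef
      have hgfil : g = pre.filter (fun c0 => pvGet c0 "name" == some n) := hfil n
      have hex : ∃ c0 ∈ pre, (pvGet c0 "name" == some n) = true := by
        have := hcon n; rw [hb] at this
        exact List.any_eq_true.mp this.symm
      have hgmem : ∀ c0 ∈ g, c0 ∈ pre ∧ pvGet c0 "name" = some n := by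
        intro c0 h0
        rw [hgfil] at h0
        obtain ⟨h1, h2⟩ := List.mem_filter.mp h0
        exact ⟨h1, by simpa using h2⟩
      have hgne : g ≠ [] := by
        obtain ⟨c0, h0, h0p⟩ := hex
        rw [hgfil]
        exact List.ne_nil_of_mem (List.mem_filter.mpr ⟨h0, h0p⟩)
      have hcnt : 2 ≤ xs.countP (fun c' => pvGet c' "name" == some n) := by
        rw [hxs, List.countP_append]
        obtain ⟨c0, h0, h0p⟩ := hex
        have h1 : 0 < pre.countP (fun c' => pvGet c' "name" == some n) :=
          List.countP_pos_iff.mpr ⟨c0, h0, h0p⟩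
        have h2 : 0 < (c :: ys).countP (fun c' => pvGet c' "name" == some n) :=
          List.countP_pos_iff.mpr ⟨c, by simp, by simp [hn]⟩
        omega
      have hfieldOf : ∀ c0, c0 ∈ xs → pvGet c0 "name" = some n →
          (pvGet c0 "country").isSome ∧ (pvGet c0 "description").isSome ∧
          (pvGet c0 "cause_area").isSome := by
        intro c0 h0 h0n
        obtain ⟨_, _, hf⟩ := hPre c0 h0
        apply hf
        simpa only [h0n] using hcnt
      have hgx : ∀ c0 ∈ g, c0 ∈ xs := fun c0 h0 => by
        rw [hxs]; exact List.mem_append_left _ (hgmem c0 h0).1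
      have hgname : ∀ c0 ∈ g, pvGet c0 "name" = some n := fun c0 h0 => (hgmem c0 h0).2
      have hred_n : dA.getD n [] = pvReduce g := hred n hb
      have e1 : pvGet (pvReduce g) "name" = some n := pvReduce_get_name g n hgne hgname
      have e2 : pvGet (pvReduce g) "country" = some (pvCat g "country") :=
        pvReduce_get_country g hgne
          (fun c0 h0 => (hfieldOf c0 (hgx c0 h0) (hgname c0 h0)).1)
      have e3 : pvGet (pvReduce g) "description" = some (pvCat g "description") :=
        pvReduce_get_description g hgne
          (fun c0 h0 => (hfieldOf c0 (hgx c0 h0) (hgname c0 h0)).2.1)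
      have e4 : pvGet (pvReduce g) "cause_area" = some (pvCat g "cause_area") :=
        pvReduce_get_cause g hgne
          (fun c0 h0 => (hfieldOf c0 (hgx c0 h0) (hgname c0 h0)).2.2)
      obtain ⟨hvc, hvd, hva⟩ := hfieldOf c hc hn
      obtain ⟨vc, hvc⟩ := Option.isSome_iff_exists.mp hvc
      obtain ⟨vd, hvd⟩ := Option.isSome_iff_exists.mp hvd
      obtain ⟨va, hva⟩ := Option.isSome_iff_exists.mp hva
      have hstepA : pvStepA dA c = some (dA.insert n
          [("name", n), ("country", pvCat g "country" ++ ", " ++ vc),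
           ("description", pvCat g "description" ++ ", " ++ vd),
           ("cause_area", pvCat g "cause_area" ++ ", " ++ va)]) := by
        unfold pvStepA
        rw [hn]
        simp only [← hred_n] at e1 e2 e3 e4
        simp [hbA, e1, e2, e3, e4, hvc, hvd, hva]
      have hM : [("name", n), ("country", pvCat g "country" ++ ", " ++ vc),
           ("description", pvCat g "description" ++ ", " ++ vd),
           ("cause_area", pvCat g "cause_area" ++ ", " ++ va)] = pvReduce (g ++ [c]) := by
        rw [pvReduce, if_neg (by
          have := List.length_pos_of_ne_nil hgne
          simp only [List.length_append, List.length_cons, List.length_nil]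
          omega)]
        rw [pvNm_eq (g ++ [c]) n (by simp) (by
          intro c0 h0
          rcases List.mem_append.mp h0 with h0 | h0
          · exact hgname c0 h0
          · simp at h0; subst h0; exact hn)]
        rw [pvCat_append_singleton g c _ vc hgne hvc,
            pvCat_append_singleton g c _ vd hgne hvd,
            pvCat_append_singleton g c _ va hgne hva]
      have hInv' : pvInv (pre ++ [c]) (dA.insert n (pvReduce (g ++ [c])))
          (dB.modify n [] (· ++ [c])) := by
        have hkeysB : (dB.modify n [] (· ++ [c])).keys = dB.keys := by
          rw [PySem.Dict.keys_modify, PySem.Dict.keys_insert_of_contains _ _ hb]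
        refine ⟨?_, ?_, ?_, ?_, ?_⟩
        · rw [PySem.Dict.keys_insert_of_contains _ _ hbA, hkeysB, hk]
        · rw [hkeysB]; exact hnd
        · intro n'
          rw [PySem.Dict.getD_modify]
          by_cases hnn : n' = n
          · subst hnn
            rw [← hgdef, hgfil, List.filter_append]
            simp [hn]
          · rw [if_neg hnn, hfil n', List.filter_append]
            have : ((pvGet c "name" == some n') = false) := by
              rw [hn]; simp [Ne.symm hnn]
            simp [this]
        · intro n'
          rw [PySem.Dict.contains_modify, hcon n', List.any_append]
          by_cases hnn : n' = n
          · subst hnn; simp [hn]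
          · have : ((pvGet c "name" == some n') = false) := by
              rw [hn]; simp [Ne.symm hnn]
            simp [this, hnn]
        · intro n' hc'
          by_cases hnn : n' = n
          · subst hnn
            rw [PySem.Dict.getD_insert, if_pos rfl, PySem.Dict.getD_modify, if_pos rfl, ← hgdef]
          · rw [PySem.Dict.getD_insert, if_neg hnn, PySem.Dict.getD_modify, if_neg hnn]
            rw [PySem.Dict.contains_modify] at hc'
            have : dB.contains n' = true := by
              rcases Bool.or_eq_true_iff.mp hc' with h | h
              · exact absurd (by simpa using h) hnn
              · exact h
            exact hred n' this
      obtain ⟨dA', dB', hA, hB, hfin⟩ := ih (pre ++ [c])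
        (dA.insert n (pvReduce (g ++ [c]))) (dB.modify n [] (· ++ [c])) hxs' hInv'
      refine ⟨dA', dB', ?_, ?_, hfin⟩
      · rw [List.foldl_cons]
        rw [hM] at hstepA
        simpa [hstepA] using hA
      · rw [List.foldl_cons]; simpa [hn] using hB

-- each group's emitted record is its reduced value
theorem pvEmit_eq (xs : List (List (String × String)))
    (hPre : Pre_merge_programs_from_common_charities xs)
    (g : List (List (String × String))) (n : String)
    (hgfil : g = xs.filter (fun c0 => pvGet c0 "name" == some n)) (hgne : g ≠ []) :
    pvEmit g = some (pvReduce g) := by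
  have hgmem : ∀ c0 ∈ g, c0 ∈ xs ∧ pvGet c0 "name" = some n := by
    intro c0 h0
    rw [hgfil] at h0
    obtain ⟨h1, h2⟩ := List.mem_filter.mp h0
    exact ⟨h1, by simpa using h2⟩
  rcases List.exists_cons_of_ne_nil hgne with ⟨c0, t, hg0⟩
  have hhead : PySem.List.pyGetD g 0 [] = c0 := by
    rw [hg0]; simp [PySem.List.pyGetD_zero_cons]
  cases t with
  | nil =>
    rw [pvEmit, if_pos (by rw [hg0]; rfl), pvReduce, if_pos (by rw [hg0]; rfl), hhead, hg0]
    rfl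
  | cons c1 t' =>
    have hlen : ¬g.length = 1 := by rw [hg0]; simp
    have hcnt : 2 ≤ xs.countP (fun c0 => pvGet c0 "name" == some n) := by
      rw [List.countP_eq_length_filter, ← hgfil, hg0]
      simp
    have hfieldOf : ∀ c0 ∈ g, (pvGet c0 "country").isSome ∧
        (pvGet c0 "description").isSome ∧ (pvGet c0 "cause_area").isSome := by
      intro c2 h2
      obtain ⟨hmx, hmn⟩ := hgmem c2 h2
      obtain ⟨_, _, hf⟩ := hPre c2 hmx
      apply hf
      simpa only [hmn] using hcnt
    have hjoin : ∀ k : String, (∀ c2 ∈ g, (pvGet c2 k).isSome) →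
        pvJoinField g k = some (pvCat g k) := by
      intro k hk
      unfold pvJoinField
      rw [mapM_eq_some_map (fun c2 => pvGet c2 k) (fun c2 => (pvGet c2 k).getD "") g
        (fun c2 h2 => by
          obtain ⟨v, hv⟩ := Option.isSome_iff_exists.mp (hk c2 h2)
          simp [hv])]
      rfl
    have hj1 := hjoin "country" (fun c2 h2 => (hfieldOf c2 h2).1)
    have hj2 := hjoin "description" (fun c2 h2 => (hfieldOf c2 h2).2.1)
    have hj3 := hjoin "cause_area" (fun c2 h2 => (hfieldOf c2 h2).2.2)
    have hname : pvGet (PySem.List.pyGetD g 0 []) "name" = some n := by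
      rw [hhead]; exact (hgmem c0 (by rw [hg0]; simp)).2
    rw [pvEmit, if_neg (by simpa using hlen), pvReduce, if_neg hlen]
    rw [hname, hj1, hj2, hj3]
    rw [pvNm_eq g n hgne (fun c2 h2 => (hgmem c2 h2).2)]

theorem merge_programs_from_common_charities_spec : Claim_equal_merge_programs_from_common_charities := by
  intro xs _hdom hPre
  unfold Spec_merge_programs_from_common_charities
  have hInv0 : pvInv [] (PySem.Dict.empty) (PySem.Dict.empty) := by
    refine ⟨rfl, ?_, ?_, ?_, ?_⟩
    · simp [PySem.Dict.keys_empty]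
    · intro n; simp [PySem.Dict.getD_empty]
    · intro n; simp [PySem.Dict.contains_empty]
    · intro n h; rw [PySem.Dict.contains_empty] at h; cases h
  obtain ⟨dA', dB', hA, hB, hk, hnd, hfil, hcon, hred⟩ :=
    pvMain xs hPre xs [] PySem.Dict.empty PySem.Dict.empty (by simp) hInv0
  have hndA : dA'.keys.Nodup := by rw [hk]; exact hnd
  have hvalsA : dA'.values = dB'.values.map pvReduce := by
    rw [PySem.Dict.values_eq_map_keys dA' hndA [], PySem.Dict.values_eq_map_keys dB' hnd [],
      hk, List.map_map]
    apply List.map_congr_left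
    intro n hnmem
    exact hred n ((PySem.Dict.contains_iff_mem_keys dB' n).mpr hnmem)
  have hmapM : dB'.values.mapM pvEmit = some (dB'.values.map pvReduce) := by
    apply mapM_eq_some_map
    intro g hg
    rw [PySem.Dict.values_eq_map_keys dB' hnd []] at hg
    obtain ⟨n, hnmem, rfl⟩ := List.mem_map.mp hg
    have hcontains : dB'.contains n = true := (PySem.Dict.contains_iff_mem_keys dB' n).mpr hnmem
    have hgne : dB'.getD n [] ≠ [] := by
      have := hcon n
      rw [hcontains] at this
      obtain ⟨c0, h0, h0p⟩ := List.any_eq_true.mp this.symm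
      rw [hfil n]
      exact List.ne_nil_of_mem (List.mem_filter.mpr ⟨h0, h0p⟩)
    exact pvEmit_eq xs hPre _ n (hfil n) hgne
  show merge_programs_from_common_charities xs = merge_programs_from_common_charities_alt xs
  unfold merge_programs_from_common_charities merge_programs_from_common_charities_alt pvGroups
  rw [hA, hB]
  simp only [hmapM, hvalsA]
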